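-- pv_equiv track=rewrite | github.com/vilelaricardo/restful-api-test-generation | tool/extract_tests_data.py | extract_request_lines_blocks
-- ===== SOURCE A (Python) =====
-- def extract_request_lines_blocks(lines):
--     blocks = []
--     request_block = []
--     create_request_block = False
--
--     for line in lines:
--         if line.strip().startswith("headers = {}"):
--             create_request_block = True
--             if request_block:
--                 block = "".join(request_block).strip()
--                 blocks.append(block)
--                 request_block = []
--
--         if create_request_block:
--             request_block.append(line)
--
--     if request_block:
--         block = "".join(request_block).strip()
--         blocks.append(block)
--
--     return blocks
-- ===== SOURCE B (Python) =====
-- def extract_request_lines_blocks(lines):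
--     L = list(lines)
--     idx = [i for i, line in enumerate(L) if line.strip().startswith("headers = {}")]
--     ends = idx[1:] + [len(L)]
--     return ["".join(L[s:e]).strip() for s, e in zip(idx, ends)]
-- ===== Notes on version B (the rewrite author's own statement) =====
-- stated objective: alternative
-- what changed: Replaces A's stateful one-pass loop (boolean flag + growing request_block accumulator with flushes) by a two-phase index-then-slice pass: first collect the positions of the 'headers = {}' marker lines, then slice the list between consecutive marker positions and join/strip each slice.
import Mathlib
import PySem

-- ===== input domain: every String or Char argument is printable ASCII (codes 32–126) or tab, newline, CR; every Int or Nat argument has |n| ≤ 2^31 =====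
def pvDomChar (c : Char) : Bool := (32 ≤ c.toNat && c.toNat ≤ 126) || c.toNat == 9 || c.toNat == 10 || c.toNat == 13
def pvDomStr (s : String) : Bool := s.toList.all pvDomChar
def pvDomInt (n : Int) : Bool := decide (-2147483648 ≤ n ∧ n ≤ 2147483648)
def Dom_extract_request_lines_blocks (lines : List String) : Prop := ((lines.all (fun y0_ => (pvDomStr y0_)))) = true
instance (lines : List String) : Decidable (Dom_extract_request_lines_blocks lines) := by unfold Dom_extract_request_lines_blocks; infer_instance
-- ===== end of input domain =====

-- B replaces A's flag-and-accumulator loop by a marker-index-then-slice two-phase pass (alternative decomposition, same cost).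

-- ===== PORT A =====
-- line.strip().startswith("headers = {}")
def pvMarker (line : String) : Bool :=
  PySem.Str.startswith (PySem.Str.strip line) "headers = {}"

-- "".join(rb).strip()
def pvFlush (rb : List String) : String :=
  PySem.Str.strip (PySem.Str.join "" rb)

-- the for-loop of A, state = (blocks, request_block, create_request_block)
def pvLoopA : List String → List String → List String → Bool → List String × List String × Bool
  | [], blocks, rb, flag => (blocks, rb, flag)
  | l :: ls, blocks, rb, flag =>
    let st :=
      if pvMarker l then
        ((if rb ≠ [] then blocks ++ [pvFlush rb] else blocks), ([] : List String), true)
      else (blocks, rb, flag)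
    let rb' := if st.2.2 then st.2.1 ++ [l] else st.2.1
    pvLoopA ls st.1 rb' st.2.2

-- the trailing 'if request_block: blocks.append(...)'
def pvFinish (st : List String × List String × Bool) : List String :=
  if st.2.1 ≠ [] then st.1 ++ [pvFlush st.2.1] else st.1

def extract_request_lines_blocks (lines : List String) : List String :=
  pvFinish (pvLoopA lines [] [] false)

-- ===== PORT B =====
-- idx = [i for i, line in enumerate(L) if line.strip().startswith("headers = {}")]
def pvIdx (L : List String) : List Int :=
  ((PySem.List.enumerate L).filter (fun p => pvMarker p.2)).map (·.1)

def extract_request_lines_blocks_alt (lines : List String) : List String :=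
  ((pvIdx lines).zip ((pvIdx lines).drop 1 ++ [(lines.length : Int)])).map (fun se =>
    PySem.Str.strip (PySem.Str.join "" (PySem.List.slice lines (some se.1) (some se.2))))

-- ===== PRECONDITION & SPEC =====
def Spec_extract_request_lines_blocks (lines : List String) (out : List String) : Prop := out = extract_request_lines_blocks_alt lines
instance (lines : List String) (out : List String) : Decidable (Spec_extract_request_lines_blocks lines out) := by unfold Spec_extract_request_lines_blocks; infer_instance

-- ===== CLAIM (what is proved, stated in full; the proofs are below) =====
def Claim_equal_extract_request_lines_blocks : Prop := ∀ (lines : List String), Dom_extract_request_lines_blocks lines → Spec_extract_request_lines_blocks lines (extract_request_lines_blocks lines)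

-- ===== LEMMAS AND PROOFS =====

-- the common mathematical form: each block runs from one marker line to just before the next
def pvG : List String → List String
  | [] => []
  | x :: xs =>
    if pvMarker x then
      pvFlush (x :: xs.takeWhile (fun y => !pvMarker y)) :: pvG (xs.dropWhile (fun y => !pvMarker y))
    else pvG xs
termination_by l => l.length
decreasing_by
  · exact Nat.lt_succ_of_le (xs.length_dropWhile_le _)
  · exact Nat.lt_succ_self _

theorem pvG_dropWhile (xs : List String) :
    pvG (xs.dropWhile (fun y => !pvMarker y)) = pvG xs := by
  induction xs with
  | nil => rfl
  | cons x xs ih =>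
    by_cases h : pvMarker x
    · simp [h]
    · simp [h, ih, pvG]

-- A-side: one-step equations for the loop
theorem pvLoopA_cons_pos (l : String) (ls blocks rb : List String) (flag : Bool)
    (h : pvMarker l = true) :
    pvLoopA (l :: ls) blocks rb flag
      = pvLoopA ls (if rb ≠ [] then blocks ++ [pvFlush rb] else blocks) [l] true := by
  simp [pvLoopA, h]

theorem pvLoopA_cons_neg (l : String) (ls blocks rb : List String) (flag : Bool)
    (h : pvMarker l = false) :
    pvLoopA (l :: ls) blocks rb flag
      = pvLoopA ls blocks (if flag then rb ++ [l] else rb) flag := by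
  cases flag <;> simp [pvLoopA, h]

-- A-side: with the flag on, the loop accumulates until the next marker
theorem pvLoopA_on (ls : List String) : ∀ (blocks rb : List String), rb ≠ [] →
    pvFinish (pvLoopA ls blocks rb true)
      = blocks ++ pvFlush (rb ++ ls.takeWhile (fun y => !pvMarker y))
          :: pvG (ls.dropWhile (fun y => !pvMarker y)) := by
  induction ls with
  | nil => intro blocks rb h; simp [pvLoopA, pvFinish, pvG, h]
  | cons l ls ih =>
    intro blocks rb h
    cases hm : pvMarker l
    · rw [pvLoopA_cons_neg l ls blocks rb true hm, if_pos rfl,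
        ih blocks (rb ++ [l]) (by simp)]
      simp [hm]
    · rw [pvLoopA_cons_pos l ls blocks rb true hm, if_pos h,
        ih (blocks ++ [pvFlush rb]) [l] (by simp)]
      simp [hm, pvG]

-- A-side: before the first marker nothing happens
theorem pvLoopA_off (ls : List String) : ∀ (blocks : List String),
    pvFinish (pvLoopA ls blocks [] false) = blocks ++ pvG ls := by
  induction ls with
  | nil => intro blocks; simp [pvLoopA, pvFinish, pvG]
  | cons l ls ih =>
    intro blocks
    cases hm : pvMarker l
    · rw [pvLoopA_cons_neg l ls blocks [] false hm]
      rw [show pvG (l :: ls) = pvG ls from by simp [pvG, hm]]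
      exact ih blocks
    · rw [pvLoopA_cons_pos l ls blocks [] false hm,
        show (if ([] : List String) ≠ [] then blocks ++ [pvFlush []] else blocks) = blocks
          from by simp,
        pvLoopA_on ls blocks [l] (by simp)]
      simp [pvG, hm]

theorem portA_eq_pvG (lines : List String) : extract_request_lines_blocks lines = pvG lines := by
  simpa [extract_request_lines_blocks] using pvLoopA_off lines []

-- B-side: marker positions as naturals
def pvNatIdx : List String → List Nat
  | [] => []
  | x :: xs =>
    if pvMarker x then 0 :: (pvNatIdx xs).map (· + 1) else (pvNatIdx xs).map (· + 1)

theorem pvIdx_enumerate (xs : List String) : ∀ (s : Int),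
    (((PySem.List.enumerate xs s).filter (fun p => pvMarker p.2)).map (·.1))
      = (pvNatIdx xs).map (fun (k : Nat) => s + (k : Int)) := by
  induction xs with
  | nil => intro s; simp [PySem.List.enumerate_nil, pvNatIdx]
  | cons x xs ih =>
    intro s
    rw [PySem.List.enumerate_cons, List.filter_cons]
    cases hm : pvMarker x
    · rw [if_neg (by simp [hm]),
        show pvNatIdx (x :: xs) = (pvNatIdx xs).map (· + 1) from by simp [pvNatIdx, hm],
        ih (s + 1), List.map_map]
      apply List.map_congr_left
      intro k _
      simp only [Function.comp_apply]
      push_cast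
      ring
    · rw [if_pos (by simp [hm]),
        show pvNatIdx (x :: xs) = 0 :: (pvNatIdx xs).map (· + 1) from by simp [pvNatIdx, hm],
        List.map_cons, List.map_cons, ih (s + 1), List.map_map]
      congr 1
      · simp
      · apply List.map_congr_left
        intro k _
        simp only [Function.comp_apply]
        push_cast
        ring

-- the alt port in natural-number form
def pvAltNat (L : List String) : List String :=
  ((pvNatIdx L).zip ((pvNatIdx L).drop 1 ++ [L.length])).map
    (fun se => pvFlush ((L.drop se.1).take (se.2 - se.1)))

theorem portB_eq_pvAltNat (lines : List String) :
    extract_request_lines_blocks_alt lines = pvAltNat lines := by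
  unfold extract_request_lines_blocks_alt pvAltNat pvIdx
  rw [pvIdx_enumerate lines 0,
    show ((pvNatIdx lines).map (fun (k : Nat) => (0 : Int) + (k : Int)))
        = (pvNatIdx lines).map (fun (k : Nat) => (k : Int)) from by simp,
    show ((pvNatIdx lines).map (fun (k : Nat) => (k : Int))).drop 1 ++ [(lines.length : Int)]
        = ((pvNatIdx lines).drop 1 ++ [lines.length]).map (fun (k : Nat) => (k : Int)) from by
      simp [List.map_drop],
    List.zip_map, List.map_map]
  apply List.map_congr_left
  intro se _
  simp [Prod.map, PySem.List.slice_natCast, pvFlush]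

theorem pvNatIdx_nil_all (xs : List String) : pvNatIdx xs = [] → ∀ y ∈ xs, pvMarker y = false := by
  induction xs with
  | nil => intro _ y hy; simp at hy
  | cons x xs ih =>
    intro h y hy
    cases hm : pvMarker x
    · simp only [pvNatIdx, hm, Bool.false_eq_true, if_false, List.map_eq_nil_iff] at h
      rcases List.mem_cons.mp hy with rfl | hy'
      · exact hm
      · exact ih h y hy'
    · simp [pvNatIdx, hm] at h

theorem pvNatIdx_cons_take (xs : List String) : ∀ (i : Nat) (n : List Nat),
    pvNatIdx xs = i :: n → xs.take i = xs.takeWhile (fun y => !pvMarker y) := by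
  induction xs with
  | nil => intro i n h; simp [pvNatIdx] at h
  | cons x xs ih =>
    intro i n h
    cases hm : pvMarker x
    · simp only [pvNatIdx, hm, Bool.false_eq_true, if_false] at h
      cases hx : pvNatIdx xs with
      | nil => rw [hx] at h; simp at h
      | cons j m =>
        rw [hx] at h
        simp only [List.map_cons] at h
        obtain ⟨hi, -⟩ := List.cons.inj h
        simp [← hi, hm, List.take_succ_cons, ih j m hx]
    · simp only [pvNatIdx, hm, if_true] at h
      obtain ⟨hi, -⟩ := List.cons.inj h
      simp [← hi, hm]

-- shifting every index by one drops the head element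
theorem pvShift (x : String) (L : List String) (a b : List Nat) :
    ((a.map (· + 1)).zip (b.map (· + 1))).map
        (fun se => pvFlush (((x :: L).drop se.1).take (se.2 - se.1)))
      = (a.zip b).map (fun se => pvFlush ((L.drop se.1).take (se.2 - se.1))) := by
  rw [List.zip_map, List.map_map]
  apply List.map_congr_left
  intro se _
  simp [Prod.map, Nat.succ_sub_succ]

set_option maxHeartbeats 1000000 in
theorem pvAltNat_eq_pvG (lines : List String) : pvAltNat lines = pvG lines := by
  induction lines with
  | nil => simp [pvAltNat, pvNatIdx, pvG]
  | cons x xs ih =>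
    cases hm : pvMarker x
    · -- non-marker head: everything shifts by one
      have hzip : pvAltNat (x :: xs) = pvAltNat xs := by
        unfold pvAltNat
        rw [show pvNatIdx (x :: xs) = (pvNatIdx xs).map (· + 1) from by simp [pvNatIdx, hm],
          show ((pvNatIdx xs).map (· + 1)).drop 1 ++ [(x :: xs).length]
              = ((pvNatIdx xs).drop 1 ++ [xs.length]).map (· + 1) from by
            simp [List.map_drop],
          pvShift]
      rw [hzip, ih, show pvG (x :: xs) = pvG xs from by simp [pvG, hm]]
    · cases hx : pvNatIdx xs with
      | nil =>
        have hall := pvNatIdx_nil_all xs hx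
        have ht : xs.takeWhile (fun y => !pvMarker y) = xs := by
          rw [List.takeWhile_eq_self_iff]
          intro y hy; simp [hall y hy]
        have hd : xs.dropWhile (fun y => !pvMarker y) = [] := by
          rw [List.dropWhile_eq_nil_iff]
          intro y hy; simp [hall y hy]
        simp [pvAltNat, pvNatIdx, hm, hx, pvG, ht, hd, List.take_succ_cons,
          List.take_of_length_le]
      | cons i n =>
        have ht := pvNatIdx_cons_take xs i n hx
        have hzip : pvAltNat (x :: xs) = pvFlush (x :: xs.take i) :: pvAltNat xs := by
          unfold pvAltNat
          rw [show pvNatIdx (x :: xs) = 0 :: (i + 1) :: n.map (· + 1) from by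
              simp [pvNatIdx, hm, hx],
            show ((0 : Nat) :: (i + 1) :: n.map (· + 1)).drop 1 ++ [(x :: xs).length]
                = (i + 1) :: (n.map (· + 1) ++ [xs.length + 1]) from by simp,
            List.zip_cons_cons, List.map_cons]
          refine congrArg₂ List.cons ?_ ?_
          · simp [List.take_succ_cons]
          · rw [hx,
              show ((i + 1) :: n.map (· + 1)) = (i :: n).map (· + 1) from by simp,
              show (n.map (· + 1) ++ [xs.length + 1]) = (n ++ [xs.length]).map (· + 1) from by
                simp,
              pvShift]
            simp
        rw [hzip, ht, ih, ← pvG_dropWhile xs]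
        simp [pvG, hm]

-- ===== VERDICT (by name: the statement is the Claim_ definition above) =====
theorem extract_request_lines_blocks_spec : Claim_equal_extract_request_lines_blocks := by
  intro lines _
  unfold Spec_extract_request_lines_blocks
  rw [portA_eq_pvG, portB_eq_pvAltNat, pvAltNat_eq_pvG]
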